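-- pv_equiv track=rewrite | github.com/magnus-ffcg/dbt2lookml | dbt2lookml/models/column_collections.py | _find_array_parent
-- ===== SOURCE A (Python) =====
-- from typing import Dict, List, Set
--
-- def _find_array_parent(col_name: str, array_model_names: Set[str]) -> str:
--     """Find which array model this column belongs to, if any."""
--     # Find the most specific (longest) array parent that matches
--     matching_arrays = []
--     for array_name in array_model_names:
--         if col_name.startswith(f"{array_name}."):
--             matching_arrays.append(array_name)
--
--     # Return the longest match (most specific)
--     if matching_arrays:
--         return max(matching_arrays, key=len)
--     return None
-- ===== SOURCE B (Python) =====
-- from typing import Set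
--
--
-- def _find_array_parent(col_name: str, array_model_names: Set[str]) -> str:
--     """Find which array model this column belongs to, if any."""
--     # Scan split points from the right: the first dot position whose prefix
--     # is a known array name yields the longest (most specific) parent.
--     for i in range(len(col_name) - 1, -1, -1):
--         if col_name[i] == '.' and col_name[:i] in array_model_names:
--             return col_name[:i]
--     return None
-- ===== Notes on version B (the rewrite author's own statement) =====
-- stated objective: alternative
-- what changed: Instead of scanning every array name, testing each as a dotted prefix and taking the max by length, B walks col_name's own dot positions from the right and returns the first prefix found in the name set, so the name collection is never iterated (faster when names are many, not confirmed uniformly in a timing run).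
import Mathlib
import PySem

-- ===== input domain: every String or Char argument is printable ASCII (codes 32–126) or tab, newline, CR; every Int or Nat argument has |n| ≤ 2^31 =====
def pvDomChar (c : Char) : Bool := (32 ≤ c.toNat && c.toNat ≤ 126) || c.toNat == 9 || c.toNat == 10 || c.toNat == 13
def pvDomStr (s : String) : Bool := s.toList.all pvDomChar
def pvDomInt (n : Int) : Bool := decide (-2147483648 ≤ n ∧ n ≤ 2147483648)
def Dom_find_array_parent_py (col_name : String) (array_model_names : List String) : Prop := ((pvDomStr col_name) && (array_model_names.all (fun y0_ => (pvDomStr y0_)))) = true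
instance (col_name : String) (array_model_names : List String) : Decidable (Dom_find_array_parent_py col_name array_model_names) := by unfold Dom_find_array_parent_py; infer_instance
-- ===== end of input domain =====

-- B replaces A's scan of every array name (prefix test each, then max by length) by a
-- right-to-left walk over col_name's own dot positions with a set-membership test,
-- returning the first (= longest) dotted prefix that is an array name.
-- A iterates a Python set; its result is order-independent (matches of equal length are
-- the identical string), so the port over the element list is exact.

-- ===== PORT A =====
def find_array_parent_py (col_name : String) (array_model_names : List String) : Option String :=
  let matching := array_model_names.foldl
    (fun acc array_name =>
      if PySem.Str.startswith col_name (array_name ++ ".") then acc ++ [array_name] else acc) []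
  if matching = [] then none else PySem.List.max? matching PySem.Str.len

-- ===== PORT B =====
-- the loop 'for i in range(len(col_name)-1, -1, -1)' with early return, as structural
-- recursion on the remaining count: step k+1 inspects index k, falls through to k.
def find_array_parent_py_alt_go (cs : List Char) (array_model_names : List String) : Nat → Option String
  | 0 => none
  | k + 1 =>
    if cs[k]? = some '.' ∧ String.ofList (cs.take k) ∈ array_model_names then
      some (String.ofList (cs.take k))
    else
      find_array_parent_py_alt_go cs array_model_names k

def find_array_parent_py_alt (col_name : String) (array_model_names : List String) : Option String :=
  find_array_parent_py_alt_go col_name.toList array_model_names col_name.toList.length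

-- ===== PRECONDITION & SPEC =====
def Spec_find_array_parent_py (col_name : String) (array_model_names : List String) (out : Option String) : Prop := out = find_array_parent_py_alt col_name array_model_names
instance (col_name : String) (array_model_names : List String) (out : Option String) : Decidable (Spec_find_array_parent_py col_name array_model_names out) := by unfold Spec_find_array_parent_py; infer_instance

-- ===== CLAIM (what is proved, stated in full; the proofs are below) =====
def Claim_equal_find_array_parent_py : Prop := ∀ (col_name : String) (array_model_names : List String), Dom_find_array_parent_py col_name array_model_names → Spec_find_array_parent_py col_name array_model_names (find_array_parent_py col_name array_model_names)

-- ===== LEMMAS AND PROOFS =====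

-- a "good" split index: a dot at k whose prefix is one of the names
def pvGood (cs : List Char) (arr : List String) (k : Nat) : Prop :=
  cs[k]? = some '.' ∧ String.ofList (cs.take k) ∈ arr

lemma pv_mk_toList (s : String) : String.ofList s.toList = s := by simp

lemma pv_toList_mk (l : List Char) : (String.ofList l).toList = l := by simp

lemma pv_len_eq (s : String) : PySem.Str.len s = (s.toList.length : Int) := by
  simp

-- A's startswith(col, a + ".") test, characterised at the list level by the split index |t|
lemma pv_prefix_iff (cs t : List Char) :
    ((t ++ ['.']) <+: cs) ↔ (cs[t.length]? = some '.' ∧ t = cs.take t.length) := by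
  constructor
  · intro h
    have hlen : t.length + 1 ≤ cs.length := by
      have := h.length_le; simpa using this
    have hk : t.length < cs.length := by omega
    have htake := List.prefix_iff_eq_take.mp h
    rw [show (t ++ ['.']).length = t.length + 1 by simp] at htake
    have hcs : cs.take (t.length + 1) = cs.take t.length ++ [cs[t.length]] := by
      rw [List.take_add_one]; simp [List.getElem?_eq_getElem hk]
    rw [hcs] at htake
    have hlen2 : t.length = (cs.take t.length).length := by
      simp [List.length_take]; omega
    obtain ⟨h1, h2⟩ := List.append_inj htake (by simpa using hlen2)
    have hc : cs[t.length] = '.' := (List.cons.injEq _ _ _ _ ▸ h2.symm).1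
    exact ⟨by simp [List.getElem?_eq_getElem hk, hc], h1⟩
  · rintro ⟨hdot, htake⟩
    have hk : t.length < cs.length := (List.getElem?_eq_some_iff.mp hdot).1
    have hc : cs[t.length] = '.' := by
      have := hdot; rw [List.getElem?_eq_getElem hk] at this; exact Option.some.inj this
    rw [List.prefix_iff_eq_take]
    rw [show (t ++ ['.']).length = t.length + 1 by simp]
    rw [List.take_add_one, List.getElem?_eq_getElem hk, hc, ← htake]
    rfl

-- B's loop returns none iff no split index below the bound is good
lemma pv_go_eq_none (cs : List Char) (arr : List String) (m : Nat)
    (h : ∀ k, k < m → ¬ pvGood cs arr k) :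
    find_array_parent_py_alt_go cs arr m = none := by
  induction m with
  | zero => rfl
  | succ k ih =>
    rw [find_array_parent_py_alt_go]
    split_ifs with hc
    · exact absurd hc (h k (by omega))
    · exact ih (fun j hj => h j (by omega))

-- B's loop returns the prefix at the largest good split index below the bound
lemma pv_go_eq_some (cs : List Char) (arr : List String) (m k : Nat)
    (hk : k < m) (hg : pvGood cs arr k)
    (hmax : ∀ j, k < j → j < m → ¬ pvGood cs arr j) :
    find_array_parent_py_alt_go cs arr m = some (String.ofList (cs.take k)) := by
  induction m with
  | zero => omega
  | succ n ih =>
    rw [find_array_parent_py_alt_go]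
    by_cases hkn : k = n
    · subst hkn
      split_ifs with hc
      · rfl
      · exact absurd hg hc
    · split_ifs with hc
      · exact absurd hc (hmax n (by omega) (by omega))
      · exact ih (by omega) (fun j hj1 hj2 => hmax j hj1 (by omega))

-- the list A collects is the filter of the names by the prefix test
lemma pv_matching_eq (col_name : String) (arr : List String) :
    arr.foldl (fun acc a => if PySem.Str.startswith col_name (a ++ ".") then acc ++ [a] else acc) []
      = arr.filter (fun a => PySem.Str.startswith col_name (a ++ ".")) := by
  simpa using PySem.List.foldl_append_if_eq_filter
    (fun a => PySem.Str.startswith col_name (a ++ ".")) (l := arr) (acc := [])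

lemma pv_startswith_iff (col_name a : String) :
    PySem.Str.startswith col_name (a ++ ".") = true ↔ (a ++ ".").toList <+: col_name.toList := by
  simpa using PySem.Chars.startswith_iff (s := col_name.toList) (p := (a ++ ".").toList)

-- ===== VERDICT (by name: the statement is the Claim_ definition above) =====
theorem find_array_parent_py_spec : Claim_equal_find_array_parent_py := by
  intro col_name arr _
  unfold Spec_find_array_parent_py find_array_parent_py find_array_parent_py_alt
  rw [pv_matching_eq]
  set cs := col_name.toList with hcs
  set matching := arr.filter (fun a => PySem.Str.startswith col_name (a ++ ".")) with hm
  by_cases hemp : matching = []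
  · rw [if_pos hemp]
    symm
    apply pv_go_eq_none
    intro k hk ⟨hdot, hmem⟩
    -- the prefix at k would be a match, contradicting matching = []
    have hp : PySem.Str.startswith col_name (String.ofList (cs.take k) ++ ".") = true := by
      rw [pv_startswith_iff]
      rw [← hcs]
      rw [show (String.ofList (cs.take k) ++ ".").toList = cs.take k ++ ['.'] by simp [pv_toList_mk]]
      refine (pv_prefix_iff cs (cs.take k)).mpr ?_
      have ht : (cs.take k).length = k := by simp [List.length_take]; omega
      rw [ht]
      exact ⟨hdot, rfl⟩
    have : String.ofList (cs.take k) ∈ matching := by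
      rw [hm]; exact List.mem_filter.mpr ⟨hmem, hp⟩
    rw [hemp] at this; exact absurd this (List.not_mem_nil)
  · rw [if_neg hemp]
    obtain ⟨m, hmx⟩ : ∃ m, PySem.List.max? matching PySem.Str.len = some m := by
      cases h : PySem.List.max? matching PySem.Str.len with
      | none => exact absurd (Iff.mp (PySem.List.max?_eq_none_iff _ _) h) hemp
      | some m => exact ⟨m, rfl⟩
    rw [hmx]
    have hmem := PySem.List.max?_mem hmx
    have hmax := PySem.List.max?_isMax hmx
    rw [hm] at hmem
    obtain ⟨hmarr, hms⟩ := List.mem_filter.mp hmem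
    have hpre := (pv_startswith_iff col_name m).mp hms
    rw [← hcs] at hpre
    rw [show (m ++ ".").toList = m.toList ++ ['.'] by simp] at hpre
    obtain ⟨hdot, htake⟩ := (pv_prefix_iff cs m.toList).mp hpre
    set k := m.toList.length with hkdef
    have hkn : k < cs.length := (List.getElem?_eq_some_iff.mp hdot).1
    have hmk : String.ofList (cs.take k) = m := by rw [← htake, pv_mk_toList]
    symm
    rw [show (some m = some (String.ofList (cs.take k))) from by rw [hmk]]
    apply pv_go_eq_some cs arr cs.length k hkn
    · exact ⟨hdot, by rw [hmk]; exact hmarr⟩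
    · intro j hj1 hj2 ⟨hjdot, hjmem⟩
      -- the prefix at j would be a longer match than the maximal m
      have hjlen : (cs.take j).length = j := by simp [List.length_take]; omega
      have hp : PySem.Str.startswith col_name (String.ofList (cs.take j) ++ ".") = true := by
        rw [pv_startswith_iff, ← hcs]
        rw [show (String.ofList (cs.take j) ++ ".").toList = cs.take j ++ ['.'] by simp [pv_toList_mk]]
        refine (pv_prefix_iff cs (cs.take j)).mpr ?_
        rw [hjlen]
        exact ⟨hjdot, rfl⟩
      have hin : String.ofList (cs.take j) ∈ matching := by
        rw [hm]; exact List.mem_filter.mpr ⟨hjmem, hp⟩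
      have hle := hmax _ hin
      rw [pv_len_eq, pv_len_eq, pv_toList_mk, hjlen] at hle
      have : (j : Int) ≤ (k : Int) := by simpa [hkdef] using hle
      omega
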